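-- pv_equiv track=rewrite | github.com/romedsu/IA_BD_2526 | PIA/u02_python/04_cadenas/ejercicios_04_cadenas/encriptacion.py | permutacion
-- ===== SOURCE A (Python) =====
-- def permutacion(valorKey,msgNew):
--     msgAux=[]
--
--     for j in range(4):
--         valorKey2= 0
--
--         if j== 0:
--             for i in range(len(msgNew)):
--                 valorKey2=(valorKey+i)% len(msgNew)
--                 msgAux.append(msgNew[valorKey2])
--
--
--         elif j== 1:
--             for i in range(len(msgNew)):
--                 valorKey2=((valorKey-3)+i)% len(msgNew)
--                 msgAux.append(msgNew[valorKey2])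
--
--
--         elif j == 2:
--             for i in range(len(msgNew)):
--                 valorKey2=((valorKey+4)+i)% len(msgNew)
--                 msgAux.append(msgNew[valorKey2])
--
--
--         else:
--             for i in range(len(msgNew)):
--                 valorKey2=((valorKey-2)+i)% len(msgNew)
--                 msgAux.append(msgNew[valorKey2])
--
--         msgNew=msgAux[:]
--         msgAux=[]
--
--     else:
--         return msgNew
-- ===== SOURCE B (Python) =====
-- def permutacion(valorKey, msgNew):
--     n = len(msgNew)
--     if n == 0:
--         return []
--     off = 4 * valorKey - 1
--     return [msgNew[(off + i) % n] for i in range(n)]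
-- ===== Notes on version B (the rewrite author's own statement) =====
-- stated objective: faster
-- what changed: The four sequential rotation passes (each rebuilding the whole list) are replaced by one closed-form left rotation by the net offset 4*valorKey-1, built in a single comprehension.
import Mathlib
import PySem

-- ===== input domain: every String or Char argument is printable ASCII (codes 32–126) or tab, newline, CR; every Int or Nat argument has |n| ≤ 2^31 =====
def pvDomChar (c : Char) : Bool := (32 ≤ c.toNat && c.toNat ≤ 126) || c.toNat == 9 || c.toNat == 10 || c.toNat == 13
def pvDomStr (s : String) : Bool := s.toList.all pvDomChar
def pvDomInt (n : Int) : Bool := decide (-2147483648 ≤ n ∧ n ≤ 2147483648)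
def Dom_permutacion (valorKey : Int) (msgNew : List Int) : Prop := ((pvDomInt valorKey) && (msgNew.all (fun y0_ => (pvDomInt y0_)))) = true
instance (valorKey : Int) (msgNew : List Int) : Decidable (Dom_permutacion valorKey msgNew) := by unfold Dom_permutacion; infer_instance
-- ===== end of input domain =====

-- B replaces A's four sequential rotation passes by a single closed-form rotation by the net offset 4*valorKey-1 (faster by a constant factor).

-- ===== PORT A =====
-- one inner pass of A: for i in range(len(xs)): msgAux.append(xs[(k+i)%len(xs)])
-- (the index (k+i)%len(xs) is always in range when the loop runs, so pyGetD is exact)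
def pvPass (k : Int) (xs : List Int) : List Int :=
  (PySem.List.pyRange 0 xs.length 1).foldl
    (fun acc i => acc ++ [PySem.List.pyGetD xs (PySem.Int.mod (k + i) xs.length) 0]) []

def permutacion (valorKey : Int) (msgNew : List Int) : List Int :=
  (PySem.List.pyRange 0 4 1).foldl
    (fun cur j =>
      if j == 0 then pvPass valorKey cur
      else if j == 1 then pvPass (valorKey - 3) cur
      else if j == 2 then pvPass (valorKey + 4) cur
      else pvPass (valorKey - 2) cur)
    msgNew

-- ===== PORT B =====
def permutacion_alt (valorKey : Int) (msgNew : List Int) : List Int :=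
  let n : Int := msgNew.length
  if n == 0 then []
  else
    (PySem.List.pyRange 0 n 1).map
      (fun i => PySem.List.pyGetD msgNew (PySem.Int.mod (4 * valorKey - 1 + i) n) 0)

-- ===== PRECONDITION & SPEC =====
def Spec_permutacion (valorKey : Int) (msgNew : List Int) (out : List Int) : Prop := out = permutacion_alt valorKey msgNew
instance (valorKey : Int) (msgNew : List Int) (out : List Int) : Decidable (Spec_permutacion valorKey msgNew out) := by unfold Spec_permutacion; infer_instance

-- ===== CLAIM (what is proved, stated in full; the proofs are below) =====
def Claim_equal_permutacion : Prop := ∀ (valorKey : Int) (msgNew : List Int), Dom_permutacion valorKey msgNew → Spec_permutacion valorKey msgNew (permutacion valorKey msgNew)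

-- ===== LEMMAS AND PROOFS =====

theorem pvPass_eq_map (k : Int) (xs : List Int) :
    pvPass k xs = (PySem.List.pyRange 0 xs.length 1).map
      (fun i => PySem.List.pyGetD xs (PySem.Int.mod (k + i) xs.length) 0) := by
  rw [pvPass, PySem.List.foldl_append_singleton_eq_map]
  simp

theorem pvPass_length (k : Int) (xs : List Int) : (pvPass k xs).length = xs.length := by
  simp [pvPass_eq_map, PySem.List.length_pyRange_one]

theorem pvPass_nil (k : Int) : pvPass k ([] : List Int) = [] := by
  simp [pvPass_eq_map]

theorem pvPass_comp (a b : Int) (xs : List Int) :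
    pvPass a (pvPass b xs) = pvPass (a + b) xs := by
  rcases eq_or_ne xs [] with h | h
  · subst h; simp [pvPass_nil]
  · have hn : (0 : Int) < (xs.length : Int) := by
      have := List.length_pos_iff.mpr h; exact_mod_cast this
    rw [pvPass_eq_map a (pvPass b xs), pvPass_eq_map (a + b) xs, pvPass_length, pvPass_eq_map b xs]
    apply List.map_congr_left
    intro i hi
    have hib := (PySem.List.mem_pyRange_one).mp hi
    have h0 := PySem.Int.mod_nonneg (a + i) hn
    have h1 := PySem.Int.mod_lt (a + i) hn
    rw [PySem.List.pyGetD_map_pyRange_of_nonneg _ _ _ _ h0 h1]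
    congr 1
    rw [PySem.Int.mod_eq_emod_of_pos hn, PySem.Int.mod_eq_emod_of_pos hn,
        PySem.Int.mod_eq_emod_of_pos hn, Int.add_emod_emod]
    congr 1; ring

theorem permutacion_eq_pvPass (valorKey : Int) (msgNew : List Int) :
    permutacion valorKey msgNew = pvPass (4 * valorKey - 1) msgNew := by
  have h4 : PySem.List.pyRange 0 4 1 = [0, 1, 2, 3] := by decide
  simp only [permutacion, h4, List.foldl]
  norm_num [pvPass_comp]
  congr 1; ring

-- ===== VERDICT (by name: the statement is the Claim_ definition above) =====
theorem permutacion_spec : Claim_equal_permutacion := by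
  intro valorKey msgNew _
  unfold Spec_permutacion permutacion_alt
  rw [permutacion_eq_pvPass]
  rcases eq_or_ne msgNew [] with h | h
  · subst h; simp [pvPass_nil]
  · have hn : ((msgNew.length : Int) == 0) = false := by
      have := List.length_pos_iff.mpr h; simp; omega
    simp only [hn, if_neg Bool.false_ne_true, pvPass_eq_map]
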